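-- pv_equiv track=rewrite | github.com/worldwonderer/zenstory | apps/server/flows/atomic_tasks/narrative/summary_based_aggregation.py | _expand_id_ranges
-- ===== SOURCE A (Python) =====
-- def _expand_id_ranges(ranges: list[list[int]]) -> list[int]:
--     """
--     将 ID 区间列表展开为完整的 ID 列表
--
--     Args:
--         ranges: ID 区间列表，格式为 [[start1, end1], [start2, end2], ...]
--
--     Returns:
--         List[int]: 展开后的 ID 列表（去重并排序）
--
--     Examples:
--         >>> _expand_id_ranges([[554, 565], [646, 652]])
--         [554, 555, 556, ..., 565, 646, 647, ..., 652]
--     """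
--     plot_ids = []
--
--     for range_item in ranges:
--         if not isinstance(range_item, list) or len(range_item) != 2:
--             continue
--
--         # 修复: 自动修正顺序,避免 start > end 导致空列表
--         start, end = min(range_item), max(range_item)
--
--         if not isinstance(start, int) or not isinstance(end, int):
--             continue
--
--         # 展开区间（包含起始和结束）
--         plot_ids.extend(range(start, end + 1))
--
--     # 去重并排序
--     return sorted(set(plot_ids))
-- ===== SOURCE B (Python) =====
-- def _expand_id_ranges(ranges: list[list[int]]) -> list[int]:
--     """Sort the (normalised) intervals, merge overlapping/adjacent ones, and
--     emit each ID exactly once in increasing order (no set of all IDs, no final sort)."""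
--     intervals = sorted(
--         ((min(r), max(r)) for r in ranges
--          if isinstance(r, list) and len(r) == 2),
--         key=lambda p: p[0],
--     )
--     out = []
--     if not intervals:
--         return out
--     (lo, hi), rest = intervals[0], intervals[1:]
--     for a, b in rest:
--         if a <= hi + 1:
--             if b > hi:
--                 hi = b
--         else:
--             out.extend(range(lo, hi + 1))
--             lo, hi = a, b
--     out.extend(range(lo, hi + 1))
--     return out
-- ===== Notes on version B (the rewrite author's own statement) =====
-- stated objective: alternative
-- what changed: Instead of extending one big list with every ID of every interval and then running sorted(set(...)) over all of them, B sorts the normalised (lo, hi) intervals, merges overlapping/adjacent ones in a single pass, and emits each ID exactly once already in increasing order (no set, no final sort of the expanded IDs).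
import Mathlib
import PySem

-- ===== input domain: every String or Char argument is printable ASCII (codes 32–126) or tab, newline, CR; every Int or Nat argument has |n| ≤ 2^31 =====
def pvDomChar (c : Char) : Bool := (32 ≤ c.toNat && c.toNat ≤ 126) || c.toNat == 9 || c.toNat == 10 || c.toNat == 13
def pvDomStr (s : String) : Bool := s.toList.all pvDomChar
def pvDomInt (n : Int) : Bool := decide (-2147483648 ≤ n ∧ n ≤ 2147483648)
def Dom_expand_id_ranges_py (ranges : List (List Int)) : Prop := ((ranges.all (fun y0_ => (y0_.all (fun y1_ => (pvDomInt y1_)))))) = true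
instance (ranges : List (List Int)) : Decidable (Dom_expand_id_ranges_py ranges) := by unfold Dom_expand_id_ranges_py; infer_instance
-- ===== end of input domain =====

-- B replaces A's "expand every interval into one big list, then sorted(set(...))"
-- by sort-the-intervals + merge-overlaps + emit-each-ID-once (alternative algorithm).


-- ===== PORT A =====
-- 'isinstance' checks are trivially true under the Lean typing List (List Int);
-- min(r)/max(r) are PySem.List.min?/max? (some _ whenever r.length = 2, so getD 0 is never the default).
def expand_id_ranges_py (ranges : List (List Int)) : List Int :=
  let plot_ids := ranges.foldl (fun acc r =>
    if r.length == 2 then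
      acc ++ PySem.List.pyRange ((PySem.List.min? r (fun x => x)).getD 0)
                                (((PySem.List.max? r (fun x => x)).getD 0) + 1) 1
    else acc) []
  PySem.List.sorted (PySem.Set.ofList plot_ids) (fun x => x) false

-- ===== PORT B =====
-- the generator expression '(min(r), max(r)) for r in ranges if ... len(r) == 2'
def pvIntervals (ranges : List (List Int)) : List (Int × Int) :=
  ranges.filterMap (fun r => match r with
    | [a, b] => some (min a b, max a b)
    | _ => none)

-- the merge loop over the remaining sorted intervals, carrying (lo, hi) and out (++ = out.extend)
def pvMerge : List (Int × Int) → Int → Int → List Int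
  | [], lo, hi => PySem.List.pyRange lo (hi + 1) 1
  | (a, b) :: rest, lo, hi =>
      if a ≤ hi + 1 then pvMerge rest lo (max hi b)
      else PySem.List.pyRange lo (hi + 1) 1 ++ pvMerge rest a b

def expand_id_ranges_py_alt (ranges : List (List Int)) : List Int :=
  match PySem.List.sorted (pvIntervals ranges) (fun p => p.1) false with
  | [] => []
  | (lo, hi) :: rest => pvMerge rest lo hi

-- ===== PRECONDITION & SPEC =====
def Spec_expand_id_ranges_py (ranges : List (List Int)) (out : List Int) : Prop := out = expand_id_ranges_py_alt ranges
instance (ranges : List (List Int)) (out : List Int) : Decidable (Spec_expand_id_ranges_py ranges out) := by unfold Spec_expand_id_ranges_py; infer_instance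

-- ===== CLAIM (what is proved, stated in full; the proofs are below) =====
def Claim_equal_expand_id_ranges_py : Prop := ∀ (ranges : List (List Int)), Dom_expand_id_ranges_py ranges → Spec_expand_id_ranges_py ranges (expand_id_ranges_py ranges)

-- ===== LEMMAS AND PROOFS =====

theorem pv_min_pair (a b : Int) : PySem.List.min? [a, b] (fun x => x) = some (min a b) := by
  simp [PySem.List.min?]; split <;> simp <;> omega

theorem pv_max_pair (a b : Int) : PySem.List.max? [a, b] (fun x => x) = some (max a b) := by
  simp [PySem.List.max?]; split <;> simp <;> omega

theorem pv_len_two {r : List Int} (h : r.length = 2) : ∃ a b, r = [a, b] := by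
  match r, h with
  | [a, b], _ => exact ⟨a, b, rfl⟩

theorem pv_mem_minmax_range (a b x : Int) :
    x ∈ PySem.List.pyRange (min a b) (max a b + 1) 1 ↔ min a b ≤ x ∧ x ≤ max a b := by
  rw [PySem.List.mem_pyRange_one, Int.lt_add_one_iff]

-- A's accumulated plot_ids list, membership-characterised by pvIntervals
theorem pv_plot_mem (ranges : List (List Int)) (x : Int) :
    (x ∈ ranges.foldl (fun acc r =>
      if r.length == 2 then
        acc ++ PySem.List.pyRange ((PySem.List.min? r (fun x => x)).getD 0)
                                  (((PySem.List.max? r (fun x => x)).getD 0) + 1) 1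
      else acc) []) ↔ ∃ p ∈ pvIntervals ranges, p.1 ≤ x ∧ x ≤ p.2 := by
  rw [PySem.List.foldl_congr_mem ranges _
      (fun acc r => acc ++ (if r.length == 2 then
          PySem.List.pyRange ((PySem.List.min? r (fun x => x)).getD 0)
                             (((PySem.List.max? r (fun x => x)).getD 0) + 1) 1 else []))
      [] (by intro acc r _; split <;> rename_i h <;> simp [h]),
    PySem.List.foldl_append_eq_flatMap]
  simp only [List.nil_append, List.mem_flatMap, pvIntervals, List.mem_filterMap]
  constructor
  · rintro ⟨r, hr, hx⟩
    by_cases h2 : r.length = 2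
    · obtain ⟨a, b, rfl⟩ := pv_len_two h2
      simp only [List.length_cons, List.length_nil, beq_self_eq_true,
        pv_min_pair, pv_max_pair, Option.getD_some, reduceIte] at hx
      rw [pv_mem_minmax_range] at hx
      exact ⟨(min a b, max a b), ⟨[a, b], hr, rfl⟩, hx⟩
    · simp [h2] at hx
  · rintro ⟨p, ⟨r, hr, hfr⟩, hx1, hx2⟩
    refine ⟨r, hr, ?_⟩
    match r, hfr with
    | [a, b], hfr =>
      simp only [Option.some.injEq] at hfr
      subst hfr
      simp only [List.length_cons, List.length_nil, pv_min_pair, pv_max_pair,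
        Option.getD_some]
      exact (pv_mem_minmax_range a b x).mpr ⟨hx1, hx2⟩

theorem pv_intervals_le (ranges : List (List Int)) {p : Int × Int} (hp : p ∈ pvIntervals ranges) :
    p.1 ≤ p.2 := by
  simp only [pvIntervals, List.mem_filterMap] at hp
  obtain ⟨r, _, hfr⟩ := hp
  match r, hfr with
  | [a, b], hfr =>
    simp only [Option.some.injEq] at hfr
    subst hfr
    exact min_le_max

theorem pvMerge_lb (rest : List (Int × Int)) (lo hi : Int) (hlohi : lo ≤ hi)
    (hlo : ∀ p ∈ rest, lo ≤ p.1) (hab : ∀ p ∈ rest, p.1 ≤ p.2)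
    (hp : rest.Pairwise (fun p q => p.1 ≤ q.1)) :
    ∀ x ∈ pvMerge rest lo hi, lo ≤ x := by
  induction rest generalizing lo hi with
  | nil =>
    intro x hx
    simp only [pvMerge, PySem.List.mem_pyRange_one] at hx
    exact hx.1
  | cons q rest ih =>
    obtain ⟨a, b⟩ := q
    have ha : lo ≤ a := hlo _ (List.mem_cons_self ..)
    have hb : a ≤ b := hab _ (List.mem_cons_self ..)
    rw [List.pairwise_cons] at hp
    intro x hx
    simp only [pvMerge] at hx
    split at hx
    · exact ih lo (max hi b) (le_trans hlohi (le_max_left _ _))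
        (fun p h => hlo p (List.mem_cons_of_mem _ h))
        (fun p h => hab p (List.mem_cons_of_mem _ h)) hp.2 x hx
    · rcases List.mem_append.mp hx with h | h
      · rw [PySem.List.mem_pyRange_one] at h; exact h.1
      · exact le_trans ha (ih a b hb hp.1
          (fun p h => hab p (List.mem_cons_of_mem _ h)) hp.2 x h)

theorem pvMerge_mem (rest : List (Int × Int)) (lo hi : Int) (x : Int) (hlohi : lo ≤ hi)
    (hlo : ∀ p ∈ rest, lo ≤ p.1) (hab : ∀ p ∈ rest, p.1 ≤ p.2)
    (hp : rest.Pairwise (fun p q => p.1 ≤ q.1)) :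
    x ∈ pvMerge rest lo hi ↔ (lo ≤ x ∧ x ≤ hi) ∨ ∃ p ∈ rest, p.1 ≤ x ∧ x ≤ p.2 := by
  induction rest generalizing lo hi with
  | nil =>
    simp only [pvMerge, PySem.List.mem_pyRange_one, List.not_mem_nil]
    constructor
    · intro h; exact Or.inl ⟨h.1, by omega⟩
    · rintro (h | ⟨p, hp', _⟩)
      · exact ⟨h.1, by omega⟩
      · simp at hp'
  | cons q rest ih =>
    obtain ⟨a, b⟩ := q
    have ha : lo ≤ a := hlo _ (List.mem_cons_self ..)
    have hb : a ≤ b := hab _ (List.mem_cons_self ..)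
    rw [List.pairwise_cons] at hp
    simp only [pvMerge]
    split
    · rename_i hcond
      rw [ih lo (max hi b) (le_trans hlohi (le_max_left _ _))
            (fun p h => hlo p (List.mem_cons_of_mem _ h))
            (fun p h => hab p (List.mem_cons_of_mem _ h)) hp.2]
      constructor
      · rintro (⟨h1, h2⟩ | ⟨p, h1, h2⟩)
        · by_cases hhi : x ≤ hi
          · exact Or.inl ⟨h1, hhi⟩
          · refine Or.inr ⟨(a, b), List.mem_cons_self .., ?_, ?_⟩ <;> simp at h2 ⊢ <;> omega
        · exact Or.inr ⟨p, List.mem_cons_of_mem _ h1, h2⟩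
      · rintro (⟨h1, h2⟩ | ⟨p, h1, h2⟩)
        · exact Or.inl ⟨h1, le_trans h2 (le_max_left _ _)⟩
        · rcases List.mem_cons.mp h1 with rfl | h1
          · exact Or.inl ⟨le_trans ha h2.1, le_trans h2.2 (le_max_right _ _)⟩
          · exact Or.inr ⟨p, h1, h2⟩
    · rename_i hcond
      rw [List.mem_append, PySem.List.mem_pyRange_one,
          ih a b hb hp.1 (fun p h => hab p (List.mem_cons_of_mem _ h)) hp.2]
      constructor
      · rintro (h | (h | ⟨p, h1, h2⟩))
        · exact Or.inl ⟨h.1, by omega⟩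
        · exact Or.inr ⟨(a, b), List.mem_cons_self .., h⟩
        · exact Or.inr ⟨p, List.mem_cons_of_mem _ h1, h2⟩
      · rintro (h | ⟨p, h1, h2⟩)
        · exact Or.inl ⟨h.1, by omega⟩
        · rcases List.mem_cons.mp h1 with rfl | h1
          · exact Or.inr (Or.inl h2)
          · exact Or.inr (Or.inr ⟨p, h1, h2⟩)

theorem pvMerge_pairwise (rest : List (Int × Int)) (lo hi : Int) (hlohi : lo ≤ hi)
    (hlo : ∀ p ∈ rest, lo ≤ p.1) (hab : ∀ p ∈ rest, p.1 ≤ p.2)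
    (hp : rest.Pairwise (fun p q => p.1 ≤ q.1)) :
    (pvMerge rest lo hi).Pairwise (· < ·) := by
  induction rest generalizing lo hi with
  | nil => exact PySem.List.pairwise_lt_pyRange_one _ _
  | cons q rest ih =>
    obtain ⟨a, b⟩ := q
    have ha : lo ≤ a := hlo _ (List.mem_cons_self ..)
    have hb : a ≤ b := hab _ (List.mem_cons_self ..)
    rw [List.pairwise_cons] at hp
    simp only [pvMerge]
    split
    · exact ih lo (max hi b) (le_trans hlohi (le_max_left _ _))
        (fun p h => hlo p (List.mem_cons_of_mem _ h))
        (fun p h => hab p (List.mem_cons_of_mem _ h)) hp.2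
    · rename_i hcond
      apply List.pairwise_append.mpr
      refine ⟨PySem.List.pairwise_lt_pyRange_one _ _,
        ih a b hb hp.1 (fun p h => hab p (List.mem_cons_of_mem _ h)) hp.2, ?_⟩
      intro x hx y hy
      rw [PySem.List.mem_pyRange_one] at hx
      have := pvMerge_lb rest a b hb hp.1
        (fun p h => hab p (List.mem_cons_of_mem _ h)) hp.2 y hy
      omega

-- ===== VERDICT (by name: the statement is the Claim_ definition above) =====
theorem expand_id_ranges_py_spec : Claim_equal_expand_id_ranges_py := by
  intro ranges _
  unfold Spec_expand_id_ranges_py expand_id_ranges_py expand_id_ranges_py_alt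
  set plot_ids := ranges.foldl (fun acc r =>
    if r.length == 2 then
      acc ++ PySem.List.pyRange ((PySem.List.min? r (fun x => x)).getD 0)
                                (((PySem.List.max? r (fun x => x)).getD 0) + 1) 1
    else acc) [] with hplot
  cases hs : PySem.List.sorted (pvIntervals ranges) (fun p => p.1) false with
  | nil =>
    have hnil : pvIntervals ranges = [] := (PySem.List.sorted_eq_nil_iff _ _ _).mp hs
    have : plot_ids = [] := by
      rw [List.eq_nil_iff_forall_not_mem]
      intro x hx
      rw [hplot, pv_plot_mem] at hx
      obtain ⟨p, hp, _⟩ := hx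
      simp [hnil] at hp
    rw [this]
    simp [PySem.Set.ofList, PySem.List.sorted]
  | cons head rest =>
    obtain ⟨lo, hi⟩ := head
    have hmem_s : ∀ p, p ∈ (lo, hi) :: rest ↔ p ∈ pvIntervals ranges := by
      intro p; rw [← hs, PySem.List.mem_sorted]
    have hab : ∀ p ∈ (lo, hi) :: rest, p.1 ≤ p.2 := fun p h =>
      pv_intervals_le ranges ((hmem_s p).mp h)
    have hpw : ((lo, hi) :: rest).Pairwise (fun p q : Int × Int => p.1 ≤ q.1) := by
      rw [← hs]; exact PySem.List.sorted_pairwise _ _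
    rw [List.pairwise_cons] at hpw
    have hlohi : lo ≤ hi := hab _ (List.mem_cons_self ..)
    have hab' : ∀ p ∈ rest, p.1 ≤ p.2 := fun p h => hab p (List.mem_cons_of_mem _ h)
    apply PySem.List.sorted_eq_of_perm_of_pairwise_lt
    · rw [List.perm_ext_iff_of_nodup
        ((pvMerge_pairwise rest lo hi hlohi hpw.1 hab' hpw.2).imp ne_of_lt)
        (PySem.Set.nodup_ofList _)]
      intro x
      rw [pvMerge_mem rest lo hi x hlohi hpw.1 hab' hpw.2, PySem.Set.mem_ofList,
          hplot, pv_plot_mem]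
      constructor
      · rintro (h | ⟨p, h1, h2⟩)
        · exact ⟨(lo, hi), (hmem_s _).mp (List.mem_cons_self ..), h⟩
        · exact ⟨p, (hmem_s p).mp (List.mem_cons_of_mem _ h1), h2⟩
      · rintro ⟨p, h1, h2⟩
        rcases List.mem_cons.mp ((hmem_s p).mpr h1) with rfl | h
        · exact Or.inl h2
        · exact Or.inr ⟨p, h, h2⟩
    · exact pvMerge_pairwise rest lo hi hlohi hpw.1 hab' hpw.2
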